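-- pv_equiv track=rewrite | github.com/anthonyoblivion124/orderflow | scripts/sales_csv_helper.py | parse_group_name
-- ===== SOURCE A (Python) =====
-- def parse_group_name(cells: list[str]) -> str:
--     for cell in cells:
--         if cell.startswith("-"):
--             return cell[1:].strip()
--     return next(
--         (cell for cell in cells if cell and cell.lower() not in {"အုပ်စု", "group"}),
--         "Unknown",
--     )
-- ===== SOURCE B (Python) =====
-- def parse_group_name(cells: list[str]) -> str:
--     candidate = None
--     for cell in cells:
--         if cell.startswith("-"):
--             return cell[1:].strip()
--         if candidate is None and cell and cell.lower() not in {"အုပ်စု", "group"}: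
--             candidate = cell
--     return candidate if candidate is not None else "Unknown"
-- ===== Notes on version B (the rewrite author's own statement) =====
-- stated objective: simpler
-- what changed: A scans the list twice (one loop for a dash cell, then a generator scan for the first eligible cell); B is a single pass that returns immediately on a dash cell and otherwise remembers the first eligible cell in a local candidate.
import Mathlib
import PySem

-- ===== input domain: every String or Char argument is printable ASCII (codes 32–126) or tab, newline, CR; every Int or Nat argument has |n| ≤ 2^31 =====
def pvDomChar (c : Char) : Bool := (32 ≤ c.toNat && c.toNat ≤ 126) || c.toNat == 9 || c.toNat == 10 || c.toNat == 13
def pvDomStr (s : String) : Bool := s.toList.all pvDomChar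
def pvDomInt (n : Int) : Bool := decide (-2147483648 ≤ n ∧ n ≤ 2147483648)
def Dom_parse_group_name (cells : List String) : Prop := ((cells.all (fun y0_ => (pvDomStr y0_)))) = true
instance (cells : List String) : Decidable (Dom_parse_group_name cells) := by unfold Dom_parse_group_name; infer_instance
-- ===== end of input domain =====

-- B replaces A's two sequential scans (dash loop, then generator scan) with one pass
-- keeping a local candidate; objective: simpler.


-- ===== PORT A =====
-- first loop: return strip(cell[1:]) for the first cell starting with "-"
def pgnDashLoop : List String → Option String
  | [] => none
  | c :: rest =>
    if PySem.Str.startswith c "-" then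
      some (PySem.Str.strip (PySem.Str.slice c (some 1) none))
    else pgnDashLoop rest

-- the generator in next(...): first cell that is truthy and whose lower() is not in the set
def pgnNextLoop : List String → String
  | [] => "Unknown"
  | c :: rest =>
    if c ≠ "" ∧ PySem.Str.lower c ∉ ["အုပ်စု", "group"] then c
    else pgnNextLoop rest

def parse_group_name (cells : List String) : String :=
  match pgnDashLoop cells with
  | some s => s
  | none => pgnNextLoop cells

-- ===== PORT B =====
def pgnAltLoop : List String → Option String → String
  | [], cand => cand.getD "Unknown"
  | c :: rest, cand =>
    if PySem.Str.startswith c "-" then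
      PySem.Str.strip (PySem.Str.slice c (some 1) none)
    else
      pgnAltLoop rest
        (if cand = none ∧ c ≠ "" ∧ PySem.Str.lower c ∉ ["အုပ်စု", "group"]
         then some c else cand)

def parse_group_name_alt (cells : List String) : String :=
  pgnAltLoop cells none

-- ===== PRECONDITION & SPEC =====
def Spec_parse_group_name (cells : List String) (out : String) : Prop := out = parse_group_name_alt cells
instance (cells : List String) (out : String) : Decidable (Spec_parse_group_name cells out) := by unfold Spec_parse_group_name; infer_instance

-- ===== CLAIM (what is proved, stated in full; the proofs are below) =====
def Claim_equal_parse_group_name : Prop := ∀ (cells : List String), Dom_parse_group_name cells → Spec_parse_group_name cells (parse_group_name cells)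

-- ===== LEMMAS AND PROOFS =====
-- with candidate already fixed at x, B returns the dash result if any, else x
theorem pgnAltLoop_some (cells : List String) (x : String) :
    pgnAltLoop cells (some x) = (pgnDashLoop cells).getD x := by
  induction cells with
  | nil => rfl
  | cons c rest ih =>
    simp only [pgnAltLoop, pgnDashLoop]
    split_ifs with h h2
    · rfl
    · exact absurd h2 (by simp)
    · exact ih

theorem pgnAltLoop_none (cells : List String) :
    pgnAltLoop cells none = (pgnDashLoop cells).getD (pgnNextLoop cells) := by
  induction cells with
  | nil => rfl
  | cons c rest ih =>
    simp only [pgnAltLoop, pgnDashLoop, pgnNextLoop]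
    split_ifs with h h2 h3
    · rfl
    all_goals simp_all [pgnAltLoop_some, ih]

-- ===== VERDICT (by name: the statement is the Claim_ definition above) =====
theorem parse_group_name_spec : Claim_equal_parse_group_name := by
  intro cells _
  unfold Spec_parse_group_name parse_group_name parse_group_name_alt
  rw [pgnAltLoop_none]
  cases pgnDashLoop cells <;> rfl
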